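-- pv_equiv track=rewrite | github.com/ZRayce/Genesis-Cyber-Toolkit | tools/password_recovery.py | generate_from_pattern
-- ===== SOURCE A (Python) =====
-- import itertools
--
-- CHAR_MAP = {
--     "letter": "abcdefghijklmnopqrstuvwxyzABCDEFGHIJKLMNOPQRSTUVWXYZ",
--     "digit": "0123456789",
--     "special": "!@#$%^&*"
-- }
--
-- def generate_from_pattern(pattern, limit=30):
--     pools = []
--
--     for p in pattern:
--         if p in CHAR_MAP:
--             pools.append(CHAR_MAP[p])
--         else:
--             pools.append(p)
--
--     results = []
--
--     for combo in itertools.product(*pools):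
--         results.append(''.join(combo))
--
--         if len(results) >= limit:
--             break
--
--     return results
-- ===== SOURCE B (Python) =====
-- CHAR_MAP = {
--     "letter": "abcdefghijklmnopqrstuvwxyzABCDEFGHIJKLMNOPQRSTUVWXYZ",
--     "digit": "0123456789",
--     "special": "!@#$%^&*"
-- }
--
-- def generate_from_pattern(pattern, limit=30):
--     pools = [CHAR_MAP.get(p, p) for p in pattern]
--     total = 1
--     for pool in pools:
--         total *= len(pool)
--     count = min(total, max(limit, 0))
--     rows = ['']
--     for pool in reversed(pools):
--         new = []
--         for c in pool:
--             new.extend(c + s for s in rows)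
--             if len(new) >= count:
--                 break
--         rows = new[:count]
--     return rows[:count]
-- ===== Notes on version B (the rewrite author's own statement) =====
-- stated objective: alternative
-- what changed: Replaces the lazy itertools.product enumeration with an append-then-check break by computing the number of results up front and building the suffix products right-to-left, extending them pool by pool with truncation to that count.
-- intended difference: For limit <= 0 with all pools nonempty, A still returns the first combination because it appends before testing the limit, while B returns no combinations, which is the intended result when at most zero passwords are requested. — e.g. on generate_from_pattern([], 0): A returns [""], B returns []
import Mathlib
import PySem

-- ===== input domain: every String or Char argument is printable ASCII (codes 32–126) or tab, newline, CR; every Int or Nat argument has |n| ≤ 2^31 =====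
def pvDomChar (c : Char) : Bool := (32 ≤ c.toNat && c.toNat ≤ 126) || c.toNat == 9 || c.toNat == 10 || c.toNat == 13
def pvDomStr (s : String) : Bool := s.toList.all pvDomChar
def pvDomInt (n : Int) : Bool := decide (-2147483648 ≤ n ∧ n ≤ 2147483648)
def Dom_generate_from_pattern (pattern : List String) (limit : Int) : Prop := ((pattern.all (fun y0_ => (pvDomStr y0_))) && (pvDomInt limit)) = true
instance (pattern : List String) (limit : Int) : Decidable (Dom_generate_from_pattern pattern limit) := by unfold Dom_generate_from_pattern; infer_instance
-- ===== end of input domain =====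

-- B replaces A's lazy cartesian-product enumeration (itertools.product with an
-- append-then-check break) by computing the result count up front and building the
-- suffix products right-to-left, extended pool by pool in blocks and truncated to that
-- count; return values agree everywhere except the intended difference stated at D_
-- below (limit <= 0 with all pools nonempty, where A returns one combination, B []).


-- ===== PORT A =====
-- CHAR_MAP lookup: 'p in CHAR_MAP' on a 3-key literal dict ported as the if-chain over its keys
def pvPoolA (p : String) : List Char :=
  (if p = "letter" then "abcdefghijklmnopqrstuvwxyzABCDEFGHIJKLMNOPQRSTUVWXYZ"
   else if p = "digit" then "0123456789"
   else if p = "special" then "!@#$%^&*"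
   else p).toList

-- the 'for combo in itertools.product(*pools)' loop with its append-then-break body,
-- realized lazily (as itertools.product is) by nested iteration over the pools;
-- the Bool is the 'len(results) >= limit' break flag
-- 'results' is threaded back-to-front (cons = Python's O(1) append) and reversed at the end
def pvA_go (limit : Int) : List (List Char) → List Char → List String → List String × Bool
  | [], pref, res =>
      let res' := String.mk pref :: res
      (res', decide ((res'.length : Int) ≥ limit))
  | pool :: rest, pref, res =>
      pool.foldl (fun st c => if st.2 then st else pvA_go limit rest (pref ++ [c]) st.1) (res, false)
termination_by pools _ _ => pools.length
decreasing_by simp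

-- 'itertools.product(*pools)' is the empty iterator as soon as any pool is empty; the
-- isEmpty test realizes that exhaustion (the loop body then never runs), exactly as the
-- lazy iterator does, instead of recursing through prefixes that can never reach a leaf.
def generate_from_pattern (pattern : List String) (limit : Int) : List String :=
  let pools := pattern.map pvPoolA
  if pools.any (·.isEmpty) then []
  else (pvA_go limit pools [] []).1.reverse

-- ===== PORT B =====
def pvPoolB (p : String) : List Char :=
  (if p = "letter" then "abcdefghijklmnopqrstuvwxyzABCDEFGHIJKLMNOPQRSTUVWXYZ"
   else if p = "digit" then "0123456789"
   else if p = "special" then "!@#$%^&*"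
   else p).toList

-- 'total = 1; for pool in pools: total *= len(pool)'-- 'total = 1; for pool in pools: total *= len(pool)'
def pvB_total (pools : List (List Char)) : Nat :=
  pools.foldl (fun a p => a * p.length) 1

-- inner loop: 'for c in pool: new.extend(c + s for s in rows); if len(new) >= count: break'
-- (acc = len(new) so far; each block is appended once, as list.extend does)
def pvB_ext (count : Nat) (rows : List (List Char)) : List Char → Nat → List (List Char)
  | [], _ => []
  | c :: cs, acc =>
      let block := rows.map (fun s => c :: s)
      if count ≤ acc + block.length then block
      else block ++ pvB_ext count rows cs (acc + block.length)

def generate_from_pattern_alt (pattern : List String) (limit : Int) : List String :=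
  let pools := pattern.map pvPoolB
  let total := pvB_total pools
  let count := min total (max limit 0).toNat
  let rows := pools.reverse.foldl (fun rows pool => (pvB_ext count rows pool 0).take count) [[]]
  (rows.take count).map String.mk

-- ===== PRECONDITION & SPEC =====
-- For limit <= 0 with all pools nonempty, A still returns the first combination because it
-- appends before testing the limit, while B returns no combinations, the intended result
-- for a non-positive requested count.
def D_generate_from_pattern (pattern : List String) (limit : Int) : Prop :=
  limit ≤ 0 ∧ ∀ p ∈ pattern, (p = "letter" ∨ p = "digit" ∨ p = "special" ∨ p ≠ "")
instance (pattern : List String) (limit : Int) : Decidable (D_generate_from_pattern pattern limit) := by unfold D_generate_from_pattern; infer_instance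

def Spec_generate_from_pattern (pattern : List String) (limit : Int) (out : List String) : Prop := ¬ D_generate_from_pattern pattern limit → out = generate_from_pattern_alt pattern limit
instance (pattern : List String) (limit : Int) (out : List String) : Decidable (Spec_generate_from_pattern pattern limit out) := by unfold Spec_generate_from_pattern; infer_instance

def pvDiffWitness_generate_from_pattern : List String × Int := ([], 0)
def pvDiffWitnessOut_generate_from_pattern : (List String) × (List String) := ([""], [])

-- ===== CLAIM (what is proved, stated in full; the proofs are below) =====
def Claim_unchanged_generate_from_pattern : Prop := ∀ (pattern : List String) (limit : Int), Dom_generate_from_pattern pattern limit → Spec_generate_from_pattern pattern limit (generate_from_pattern pattern limit)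
def Claim_changed_generate_from_pattern : Prop := Dom_generate_from_pattern (pvDiffWitness_generate_from_pattern.1) (pvDiffWitness_generate_from_pattern.2) ∧ D_generate_from_pattern (pvDiffWitness_generate_from_pattern.1) (pvDiffWitness_generate_from_pattern.2) ∧ generate_from_pattern (pvDiffWitness_generate_from_pattern.1) (pvDiffWitness_generate_from_pattern.2) = pvDiffWitnessOut_generate_from_pattern.1 ∧ generate_from_pattern_alt (pvDiffWitness_generate_from_pattern.1) (pvDiffWitness_generate_from_pattern.2) = pvDiffWitnessOut_generate_from_pattern.2 ∧ pvDiffWitnessOut_generate_from_pattern.1 ≠ pvDiffWitnessOut_generate_from_pattern.2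
def Claim_exact_generate_from_pattern : Prop := ∀ (pattern : List String) (limit : Int), Dom_generate_from_pattern pattern limit → D_generate_from_pattern pattern limit → generate_from_pattern pattern limit ≠ generate_from_pattern_alt pattern limit

-- ===== LEMMAS AND PROOFS =====

-- the full cartesian product (Python order: first pool slowest), as strings with prefix
def pvG : List (List Char) → List Char → List String
  | [], pref => [String.mk pref]
  | p :: ps, pref => p.flatMap (fun c => pvG ps (pref ++ [c]))
termination_by pools _ => pools.length
decreasing_by simp

-- A's append-then-break consumption of a stream
def pvCut (limit : Int) : List String → List String → List String × Bool
  | res, [] => (res, false)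
  | res, s :: l =>
      let res' := s :: res
      if (res'.length : Int) ≥ limit then (res', true) else pvCut limit res' l

theorem pvCut_append (limit : Int) (xs : List String) :
    ∀ (res : List String) (ys : List String),
      pvCut limit res (xs ++ ys) =
        if (pvCut limit res xs).2 then pvCut limit res xs
        else pvCut limit (pvCut limit res xs).1 ys := by
  induction xs with
  | nil => intro res ys; simp [pvCut]
  | cons s xs ih =>
      intro res ys
      by_cases h : (((s :: res).length : Int) ≥ limit)
      · have h' : limit ≤ (res.length : Int) + 1 := by simp at h; omega
        simp [pvCut, h']
      · simp only [List.cons_append, pvCut, if_neg h]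
        exact ih (s :: res) ys

theorem pvCut_fst (limit : Int) :
    ∀ (l res : List String),
      (pvCut limit res l).1 = (l.take (max (limit - res.length) 1).toNat).reverse ++ res := by
  intro l
  induction l with
  | nil => intro res; simp [pvCut]
  | cons s l ih =>
      intro res
      simp only [pvCut]
      split_ifs with h
      · have h1 : (max (limit - (res.length : Int)) 1).toNat = 1 := by
          simp at h; omega
        simp [h1]
      · rw [ih (s :: res)]
        have h2 : (max (limit - (res.length : Int)) 1).toNat
            = ((max (limit - ((s :: res).length : Int)) 1).toNat) + 1 := by
          simp at h ⊢; omega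
        have h3 : (s :: l).take ((max (limit - ((s :: res).length : Int)) 1).toNat + 1)
            = s :: l.take (max (limit - ((s :: res).length : Int)) 1).toNat := by
          simp [List.take_succ_cons]
        rw [h2, h3]
        simp

theorem pvA_foldl_stop (limit : Int) (rest : List (List Char)) (pref : List Char) :
    ∀ (cs : List Char) (res : List String),
      cs.foldl (fun st c => if st.2 then st else pvA_go limit rest (pref ++ [c]) st.1) (res, true)
        = (res, true) := by
  intro cs
  induction cs with
  | nil => intro res; simp
  | cons c cs ih => intro res; simp [List.foldl_cons, ih]

theorem pvA_go_eq_cut (limit : Int) :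
    ∀ (pools : List (List Char)) (pref : List Char) (res : List String),
      pvA_go limit pools pref res = pvCut limit res (pvG pools pref) := by
  intro pools
  induction pools with
  | nil =>
      intro pref res
      simp only [pvA_go, pvG, pvCut]
      split_ifs with h
      all_goals simp only [Prod.mk.injEq, true_and, decide_eq_true_eq, decide_eq_false_iff_not]
      · exact h
      · exact h
  | cons pool rest ih =>
      intro pref res
      simp only [pvA_go, pvG]
      induction pool generalizing res with
      | nil => simp [pvCut]
      | cons c cs ihc =>
          rw [List.flatMap_cons, pvCut_append]
          rw [List.foldl_cons]
          simp only [Bool.false_eq_true, if_false]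
          rw [ih (pref ++ [c]) res]
          rcases hcut : pvCut limit res (pvG rest (pref ++ [c])) with ⟨r, stop⟩
          cases stop with
          | true => simp [pvA_foldl_stop]
          | false => simp [ihc r]

-- product of pool sizes, head-recursively
def pvTr : List (List Char) → Nat
  | [] => 1
  | p :: ps => p.length * pvTr ps

theorem pvB_total_eq_Tr (ps : List (List Char)) : pvB_total ps = pvTr ps := by
  have key : ∀ (l : List (List Char)) (a : Nat),
      l.foldl (fun a p => a * p.length) a = a * pvTr l := by
    intro l
    induction l with
    | nil => intro a; simp [pvTr]
    | cons p ps ih => intro a; simp [List.foldl_cons, ih, pvTr]; ring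
  simpa [pvB_total] using key ps 1

-- recursive mixed-radix decode (proof-side reformulation of the divmod loop)-- the cartesian product at the List Char level (first pool slowest)
def pvGL : List (List Char) → List (List Char)
  | [] => [[]]
  | p :: ps => p.flatMap (fun c => (pvGL ps).map (c :: ·))

theorem pvG_eq_mapGL : ∀ (ps : List (List Char)) (pref : List Char),
    pvG ps pref = (pvGL ps).map (fun l => String.mk (pref ++ l)) := by
  intro ps
  induction ps with
  | nil => intro pref; simp [pvG, pvGL]
  | cons p ps ih =>
      intro pref
      rw [show pvG (p :: ps) pref = p.flatMap (fun c => pvG ps (pref ++ [c])) from by rw [pvG],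
        show pvGL (p :: ps) = p.flatMap (fun c => (pvGL ps).map (c :: ·)) from rfl,
        List.map_flatMap, List.flatMap_def, List.flatMap_def]
      congr 1
      apply List.map_congr_left
      intro c _
      rw [ih (pref ++ [c]), List.map_map]
      apply List.map_congr_left
      intro l _
      simp

theorem pvGL_length : ∀ (ps : List (List Char)), (pvGL ps).length = pvTr ps := by
  intro ps
  induction ps with
  | nil => simp [pvGL, pvTr]
  | cons p ps ih =>
      show (p.flatMap (fun c => (pvGL ps).map (c :: ·))).length = p.length * pvTr ps
      rw [List.length_flatMap]
      have h : (p.map fun c => ((pvGL ps).map (c :: ·)).length) = p.map (fun _ => pvTr ps) := by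
        apply List.map_congr_left
        intro c _
        rw [List.length_map, ih]
      rw [h, List.map_const', List.sum_replicate, smul_eq_mul, Nat.mul_comm]

theorem pvTr_eq_prod (ps : List (List Char)) : pvTr ps = (ps.map List.length).prod := by
  induction ps with
  | nil => simp [pvTr]
  | cons p ps ih => simp [pvTr, ih]

theorem pvG_length (ps : List (List Char)) : (pvG ps []).length = pvTr ps := by
  rw [pvG_eq_mapGL, List.length_map, pvGL_length]

theorem pvG_nil_of_Tr_zero (ps : List (List Char)) (h : pvTr ps = 0) : pvG ps [] = [] := by
  have hl := pvG_length ps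
  rw [h] at hl
  exact List.eq_nil_of_length_eq_zero hl

-- taking k ≤ n of a flattened list is unchanged when every piece is pre-truncated to n
theorem pv_take_flatten_trunc (n : Nat) : ∀ (bs : List (List (List Char))) (k : Nat), k ≤ n →
    ((bs.map (fun b => b.take n)).flatten).take k = (bs.flatten).take k := by
  intro bs
  induction bs with
  | nil => intro k _; simp
  | cons b bs ih =>
      intro k hk
      simp only [List.map_cons, List.flatten_cons]
      rw [List.take_append, List.take_append]
      by_cases hkb : k ≤ b.length
      · have h1 : (b.take n).take k = b.take k := by
          rw [List.take_take]; congr 1; omega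
        have h2 : k - (b.take n).length = 0 := by
          rw [List.length_take]; omega
        have h3 : k - b.length = 0 := by omega
        rw [h1, h2, h3]
        simp
      · have hbn : b.length ≤ n := by omega
        rw [List.take_of_length_le hbn, List.take_of_length_le (show b.length ≤ k by omega)]
        congr 1
        exact ih (k - b.length) (by omega)

-- pvB_ext emits the truncated flat product block by block
theorem pvB_ext_take (count : Nat) (rows : List (List Char)) :
    ∀ (cs : List Char) (acc : Nat),
      (pvB_ext count rows cs acc).take (count - acc)
        = (cs.flatMap (fun c => rows.map (c :: ·))).take (count - acc) := by
  intro cs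
  induction cs with
  | nil => intro acc; simp [pvB_ext]
  | cons c cs ih =>
      intro acc
      rw [show pvB_ext count rows (c :: cs) acc
            = if count ≤ acc + (rows.map (fun s => c :: s)).length
              then rows.map (fun s => c :: s)
              else rows.map (fun s => c :: s)
                ++ pvB_ext count rows cs (acc + (rows.map (fun s => c :: s)).length) from rfl,
        List.flatMap_cons]
      set block := rows.map (fun s => c :: s) with hb
      split_ifs with h
      · rw [List.take_append]
        have h2 : count - acc - block.length = 0 := by omega
        rw [h2]
        simp
      · rw [List.take_append, List.take_append]
        have hlen : block.length ≤ count - acc := by omega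
        rw [List.take_of_length_le hlen]
        congr 1
        have harith : count - acc - block.length = count - (acc + block.length) := by omega
        rw [harith]
        exact ih (acc + block.length)

-- one step of the right-to-left loop preserves 'rows = first count of the suffix product'
theorem pvB_step_take (count : Nat) (p : List Char) (m : List (List Char)) :
    (pvB_ext count ((pvGL m).take count) p 0).take count = (pvGL (p :: m)).take count := by
  have h := pvB_ext_take count ((pvGL m).take count) p 0
  rw [Nat.sub_zero] at h
  rw [h]
  have h2 : p.flatMap (fun c => ((pvGL m).take count).map (c :: ·))
      = ((p.map (fun c => (pvGL m).map (c :: ·))).map (fun b => b.take count)).flatten := by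
    rw [List.flatMap_def, List.map_map]
    congr 1
    apply List.map_congr_left
    intro c _
    show ((pvGL m).take count).map (c :: ·) = ((pvGL m).map (c :: ·)).take count
    rw [List.map_take]
  rw [h2, pv_take_flatten_trunc count _ count (le_refl count)]
  rw [show pvGL (p :: m) = p.flatMap (fun c => (pvGL m).map (c :: ·)) from rfl, List.flatMap_def]

theorem pvB_foldl_take (count : Nat) :
    ∀ (l m : List (List Char)),
      l.foldl (fun rows pool => (pvB_ext count rows pool 0).take count) ((pvGL m).take count)
        = (pvGL (l.reverse ++ m)).take count := by
  intro l
  induction l with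
  | nil => intro m; simp
  | cons p l ih =>
      intro m
      rw [List.foldl_cons, pvB_step_take count p m, ih (p :: m)]
      simp

theorem generate_from_pattern_alt_eq_take (pattern : List String) (limit : Int) :
    generate_from_pattern_alt pattern limit
      = (pvG (pattern.map pvPoolB) []).take (max limit 0).toNat := by
  have hdef : generate_from_pattern_alt pattern limit
      = (((pattern.map pvPoolB).reverse.foldl
            (fun rows pool =>
              (pvB_ext (min (pvB_total (pattern.map pvPoolB)) (max limit 0).toNat) rows pool 0).take
                (min (pvB_total (pattern.map pvPoolB)) (max limit 0).toNat)) [[]]).take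
          (min (pvB_total (pattern.map pvPoolB)) (max limit 0).toNat)).map String.mk := rfl
  rw [hdef]
  set pools := pattern.map pvPoolB with hp
  set count := min (pvB_total pools) (max limit 0).toNat with hc
  have htot : pvB_total pools = pvTr pools := pvB_total_eq_Tr pools
  rcases Nat.eq_zero_or_pos count with h0 | hpos
  · rw [h0]
    simp only [List.take_zero, List.map_nil]
    have h0' : min (pvTr pools) (max limit 0).toNat = 0 := by omega
    have hz : (pvG pools []).take (max limit 0).toNat = [] := by
      rcases Nat.min_eq_zero_iff.mp h0' with ht | hm
      · rw [pvG_nil_of_Tr_zero pools ht]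
        simp
      · rw [hm]; simp
    rw [hz]
  · have hinit : ([[]] : List (List Char)) = (pvGL []).take count := by
      rw [show pvGL [] = [[]] from rfl]
      rw [List.take_of_length_le (by simp; omega)]
    rw [hinit, pvB_foldl_take count pools.reverse [], List.append_nil, List.reverse_reverse,
      List.take_take, Nat.min_self]
    have hcount : (pvGL pools).take count = (pvGL pools).take (max limit 0).toNat := by
      rcases Nat.le_total (pvTr pools) (max limit 0).toNat with h | h
      · have hc1 : count = pvTr pools := by omega
        rw [hc1, ← pvGL_length, List.take_length,
          List.take_of_length_le (by rw [pvGL_length]; omega)]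
      · have hc1 : count = (max limit 0).toNat := by omega
        rw [hc1]
    rw [hcount, pvG_eq_mapGL, ← List.map_take]
    apply List.map_congr_left
    intro l _
    simp

theorem pvPool_eq (pattern : List String) : pattern.map pvPoolA = pattern.map pvPoolB := by
  apply List.map_congr_left; intro p _; rfl

theorem pvTr_zero_of_empty_mem (ps : List (List Char)) (h : [] ∈ ps) : pvTr ps = 0 := by
  rw [pvTr_eq_prod]
  apply List.prod_eq_zero
  rw [List.mem_map]
  exact ⟨[], h, rfl⟩
theorem generate_from_pattern_eq_take (pattern : List String) (limit : Int) :
    generate_from_pattern pattern limit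
      = (pvG (pattern.map pvPoolA) []).take (max limit 1).toNat := by
  have hdef : generate_from_pattern pattern limit
      = if (pattern.map pvPoolA).any (·.isEmpty) then []
        else (pvA_go limit (pattern.map pvPoolA) [] []).1.reverse := rfl
  rw [hdef]
  split_ifs with h
  · rw [List.any_eq_true] at h
    obtain ⟨q, hq, hqe⟩ := h
    have hmem : [] ∈ pattern.map pvPoolA := by
      rw [List.isEmpty_iff] at hqe
      rw [← hqe]; exact hq
    rw [pvG_nil_of_Tr_zero _ (pvTr_zero_of_empty_mem _ hmem)]
    simp
  · rw [pvA_go_eq_cut, pvCut_fst]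
    simp

theorem pvTr_pos_of_all_ne (ps : List (List Char)) (h : ∀ q ∈ ps, q ≠ []) : 0 < pvTr ps := by
  rw [pvTr_eq_prod]
  apply List.prod_pos
  intro x hx
  rw [List.mem_map] at hx
  obtain ⟨q, hq, rfl⟩ := hx
  exact List.length_pos_of_ne_nil (h q hq)

theorem pvPoolB_ne_of_cond (p : String)
    (h : p = "letter" ∨ p = "digit" ∨ p = "special" ∨ p ≠ "") : pvPoolB p ≠ [] := by
  rcases h with h | h | h | h
  · subst h; decide
  · subst h; decide
  · subst h; decide
  · unfold pvPoolB
    split_ifs with h1 h2 h3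
    · subst h1; decide
    · subst h2; decide
    · subst h3; decide
    · intro hc
      exact h (String.toList_eq_nil_iff.mp hc)

theorem pvPoolB_empty_of_not_cond (p : String)
    (h : ¬(p = "letter" ∨ p = "digit" ∨ p = "special" ∨ p ≠ "")) : pvPoolB p = [] := by
  push_neg at h
  obtain ⟨h1, h2, h3, h4⟩ := h
  unfold pvPoolB
  rw [if_neg h1, if_neg h2, if_neg h3, h4]
  rfl

-- ===== VERDICT (by name: the statement is the Claim_ definition above) =====
theorem generate_from_pattern_spec : Claim_unchanged_generate_from_pattern := by
  intro pattern limit _ hnD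
  show generate_from_pattern pattern limit = generate_from_pattern_alt pattern limit
  rw [generate_from_pattern_eq_take, generate_from_pattern_alt_eq_take, pvPool_eq]
  unfold D_generate_from_pattern at hnD
  push_neg at hnD
  by_cases hl : limit ≤ 0
  · obtain ⟨p, hp, hcond⟩ := hnD hl
    have hempty : pvPoolB p = [] := pvPoolB_empty_of_not_cond p (by tauto)
    have hmem : [] ∈ pattern.map pvPoolB := by
      rw [← hempty]; exact List.mem_map_of_mem hp
    rw [pvG_nil_of_Tr_zero _ (pvTr_zero_of_empty_mem _ hmem)]
    simp
  · have h1 : (max limit 1).toNat = (max limit 0).toNat := by omega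
    rw [h1]

theorem generate_from_pattern_changed : Claim_changed_generate_from_pattern := by
  unfold Claim_changed_generate_from_pattern
  refine ⟨by decide, by decide, ?_, by decide, by decide⟩
  show generate_from_pattern [] 0 = [""]
  rw [generate_from_pattern_eq_take]
  simp [pvG]
  rfl

theorem generate_from_pattern_tight : Claim_exact_generate_from_pattern := by
  intro pattern limit _ hD
  obtain ⟨hl, hall⟩ := hD
  rw [generate_from_pattern_eq_take, generate_from_pattern_alt_eq_take, pvPool_eq]
  have hpos : 0 < pvTr (pattern.map pvPoolB) := by
    apply pvTr_pos_of_all_ne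
    intro q hq
    rw [List.mem_map] at hq
    obtain ⟨p, hp, rfl⟩ := hq
    exact pvPoolB_ne_of_cond p (hall p hp)
  have hne : pvG (pattern.map pvPoolB) [] ≠ [] := by
    intro h
    rw [← List.length_eq_zero_iff, pvG_length] at h
    omega
  have h1 : (max limit 1).toNat = 1 := by omega
  have h0 : (max limit 0).toNat = 0 := by omega
  rw [h1, h0]
  simp only [List.take_zero]
  intro h
  rw [List.take_eq_nil_iff] at h
  rcases h with h | h
  · omega
  · exact hne h
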